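-- pv_equiv track=rewrite | github.com/anna-guinet/dpa-chi-function | sim_1x5bits_to_plot_sq.py | find_rank
-- ===== SOURCE A (Python) =====
-- def find_rank(wr):
-- 	"""
-- 	Return the list of ranks for the solution kappa.
--
-- 	Parameter:
-- 	wr -- list of Decimal
--
-- 	Return:
-- 	rank -- list of integer
-- 	"""
--
-- 	# List of ranks
-- 	rank = []
--
-- 	# If the list is not empty, retrieve the rank in [0,1]
-- 	if wr:
--
-- 		# Count number of rank increment ('wr1')
-- 		# and rank decrement ('wr2')
-- 		counter_1 = sum(1 for tuple in wr if tuple[1] == ('wr1'))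
-- 		counter_2 = sum(-1 for tuple in wr if tuple[1] == ('wr2'))
-- 		num_wr = counter_1 + counter_2
--
-- 		rank_init = 1 + num_wr
--
-- 		rank.append(rank_init)
--
-- 		for tuple in wr:
--
-- 			# If 'wr1', rank increases
-- 			if tuple[1] == ('wr1'):
-- 				rank.append(rank[-1] - 1)
--
-- 			# If 'wr2', rank decreases
-- 			if tuple[1] == ('wr2'):
-- 				rank.append(rank[-1] + 1)
-- 	else:
-- 		rank = [1]
--
-- 	return rank, wr
-- ===== SOURCE B (Python) =====
-- def find_rank(wr):
--     # The final rank is always the constant 1, so build the list back-to-front: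
--     # walk wr in reverse from 1, undoing each step (wr1 undone = +1, wr2 undone = -1).
--     ranks = [1]
--     r = 1
--     for t in reversed(wr):
--         if t[1] == 'wr1':
--             r += 1
--             ranks.append(r)
--         elif t[1] == 'wr2':
--             r -= 1
--             ranks.append(r)
--     ranks.reverse()
--     return ranks, wr
-- ===== Notes on version B (the rewrite author's own statement) =====
-- stated objective: alternative
-- what changed: Instead of A's two counting passes to compute the starting rank followed by a forward walk, B uses the invariant that the final rank is always 1 and builds the list back-to-front in a single reverse pass seeded at the constant 1 (wr1 undone = +1, wr2 undone = -1), then reverses.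
import Mathlib
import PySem

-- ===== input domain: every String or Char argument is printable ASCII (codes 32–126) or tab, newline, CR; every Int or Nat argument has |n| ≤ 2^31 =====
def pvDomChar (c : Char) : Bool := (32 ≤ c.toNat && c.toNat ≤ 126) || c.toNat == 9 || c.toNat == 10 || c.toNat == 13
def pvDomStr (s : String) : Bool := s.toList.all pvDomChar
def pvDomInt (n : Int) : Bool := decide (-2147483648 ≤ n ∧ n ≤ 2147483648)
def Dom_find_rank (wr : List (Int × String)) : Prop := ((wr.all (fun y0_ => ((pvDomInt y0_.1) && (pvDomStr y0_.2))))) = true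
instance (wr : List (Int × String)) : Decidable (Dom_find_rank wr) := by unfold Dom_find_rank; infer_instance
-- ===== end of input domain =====

-- B replaces A's two counting passes + forward walk by a single back-to-front walk seeded at the constant final rank 1 (alternative decomposition, same cost).


-- ===== PORT A =====
-- one iteration of A's `for tuple in wr:` body; rank is never empty, so `(rank.getLast?).getD 0` is exactly Python's rank[-1]
def findRankStep (rank : List Int) (t : Int × String) : List Int :=
  let r1 := if t.2 = "wr1" then rank ++ [(rank.getLast?).getD 0 - 1] else rank
  if t.2 = "wr2" then r1 ++ [(r1.getLast?).getD 0 + 1] else r1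

def find_rank (wr : List (Int × String)) : List Int × (List (Int × String)) :=
  if wr ≠ [] then
    let counter_1 : Int := wr.foldl (fun s t => if t.2 = "wr1" then s + 1 else s) 0
    let counter_2 : Int := wr.foldl (fun s t => if t.2 = "wr2" then s + (-1) else s) 0
    let num_wr := counter_1 + counter_2
    let rank_init := 1 + num_wr
    (wr.foldl findRankStep [rank_init], wr)
  else
    ([1], wr)

-- ===== PORT B =====
-- one iteration of B's `for t in reversed(wr):` body over the state (r, ranks)
def findRankBackStep (st : Int × List Int) (t : Int × String) : Int × List Int :=
  if t.2 = "wr1" then (st.1 + 1, st.2 ++ [st.1 + 1])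
  else if t.2 = "wr2" then (st.1 - 1, st.2 ++ [st.1 - 1])
  else st

def find_rank_alt (wr : List (Int × String)) : List Int × (List (Int × String)) :=
  let st := wr.reverse.foldl findRankBackStep (1, [1])
  (st.2.reverse, wr)

-- ===== PRECONDITION & SPEC =====
def Spec_find_rank (wr : List (Int × String)) (out : List Int × (List (Int × String))) : Prop := out = find_rank_alt wr
instance (wr : List (Int × String)) (out : List Int × (List (Int × String))) : Decidable (Spec_find_rank wr out) := by unfold Spec_find_rank; infer_instance

-- ===== CLAIM (what is proved, stated in full; the proofs are below) =====
def Claim_equal_find_rank : Prop := ∀ (wr : List (Int × String)), Dom_find_rank wr → Spec_find_rank wr (find_rank wr)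

-- ===== LEMMAS AND PROOFS =====

-- proof-only abstraction: the per-marker deltas of A's forward walk
def findRankDeltas (wr : List (Int × String)) : List Int :=
  wr.filterMap (fun t => if t.2 = "wr1" then some (-1) else if t.2 = "wr2" then some 1 else none)

-- A's two counters sum to the negated sum of the deltas
theorem counters_eq (wr : List (Int × String)) (a b : Int) :
    wr.foldl (fun s t => if t.2 = "wr1" then s + 1 else s) a
      + wr.foldl (fun s t => if t.2 = "wr2" then s + (-1) else s) b
      = a + b - (findRankDeltas wr).sum := by
  induction wr generalizing a b with
  | nil => simp [findRankDeltas]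
  | cons t rest ih =>
    have hne : ¬(("wr1" : String) = "wr2") := by decide
    have hne2 : ¬(("wr2" : String) = "wr1") := by decide
    simp only [List.foldl_cons, findRankDeltas, List.filterMap_cons] at *
    by_cases h1 : t.2 = "wr1"
    · simp only [h1, if_pos trivial, if_neg hne, List.sum_cons]
      have H := ih (a + 1) b; omega
    · by_cases h2 : t.2 = "wr2"
      · simp only [h2, if_pos trivial, if_neg hne2, List.sum_cons]
        have H := ih a (b + -1); omega
      · simp only [if_neg h1, if_neg h2]
        exact ih a b

-- A's walk over wr, started from any list ending in x, is the prefix scan of the deltas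
theorem walk_eq_scanl (wr : List (Int × String)) (r : List Int) (x : Int) :
    wr.foldl findRankStep (r ++ [x]) = r ++ (findRankDeltas wr).scanl (· + ·) x := by
  induction wr generalizing r x with
  | nil => simp [findRankDeltas]
  | cons t rest ih =>
    have hne : ¬(("wr1" : String) = "wr2") := by decide
    have hne2 : ¬(("wr2" : String) = "wr1") := by decide
    simp only [List.foldl_cons, findRankDeltas, List.filterMap_cons]
    by_cases h1 : t.2 = "wr1"
    · have hs : findRankStep (r ++ [x]) t = (r ++ [x]) ++ [x - 1] := by
        simp [findRankStep, h1, hne]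
      rw [hs, ih (r ++ [x]) (x - 1)]
      simp only [h1, if_pos trivial, List.scanl_cons, List.append_assoc,
        List.singleton_append, findRankDeltas]
      rw [show x + (-1) = x - 1 by ring]
    · by_cases h2 : t.2 = "wr2"
      · have hs : findRankStep (r ++ [x]) t = (r ++ [x]) ++ [x + 1] := by
          simp [findRankStep, h2]
        rw [hs, ih (r ++ [x]) (x + 1)]
        simp only [h2, if_pos trivial, if_neg hne2, List.scanl_cons,
          List.append_assoc, List.singleton_append, findRankDeltas]
      · have hs : findRankStep (r ++ [x]) t = r ++ [x] := by
          simp [findRankStep, h1, h2]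
        rw [hs, ih]
        simp only [if_neg h1, if_neg h2, findRankDeltas]

-- B's backward walk (as a foldr) produces exactly the reversed prefix scan of the deltas
theorem back_walk_eq (wr : List (Int × String)) :
    wr.foldr (fun t st => findRankBackStep st t) (1, [1])
      = (1 - (findRankDeltas wr).sum,
         ((findRankDeltas wr).scanl (· + ·) (1 - (findRankDeltas wr).sum)).reverse) := by
  induction wr with
  | nil => simp [findRankDeltas]
  | cons t rest ih =>
    simp only [List.foldr_cons, ih]
    by_cases h1 : t.2 = "wr1"
    · have hd : findRankDeltas (t :: rest) = -1 :: findRankDeltas rest := by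
        simp [findRankDeltas, h1]
      rw [hd]
      simp only [findRankBackStep, h1, if_pos trivial, List.sum_cons, List.scanl_cons,
        List.reverse_cons]
      have e2 : (1 : Int) - (-1 + (findRankDeltas rest).sum) + -1
          = 1 - (findRankDeltas rest).sum := by ring
      have e1 : (1 : Int) - (-1 + (findRankDeltas rest).sum)
          = 1 - (findRankDeltas rest).sum + 1 := by ring
      rw [e2, e1]
    · by_cases h2 : t.2 = "wr2"
      · have hd : findRankDeltas (t :: rest) = 1 :: findRankDeltas rest := by
          simp [findRankDeltas, h2]
        rw [hd]
        simp only [findRankBackStep, h2, if_neg (by decide : ¬(("wr2" : String) = "wr1")),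
          if_pos trivial, List.sum_cons, List.scanl_cons, List.reverse_cons]
        have e2 : (1 : Int) - (1 + (findRankDeltas rest).sum) + 1
            = 1 - (findRankDeltas rest).sum := by ring
        have e1 : (1 : Int) - (1 + (findRankDeltas rest).sum)
            = 1 - (findRankDeltas rest).sum - 1 := by ring
        rw [e2, e1]
      · have hd : findRankDeltas (t :: rest) = findRankDeltas rest := by
          simp [findRankDeltas, h1, h2]
        rw [hd]
        simp [findRankBackStep, h1, h2]

-- ===== VERDICT (by name: the statement is the Claim_ definition above) =====
theorem find_rank_spec : Claim_equal_find_rank := by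
  unfold Claim_equal_find_rank
  intro wr _
  unfold Spec_find_rank find_rank find_rank_alt
  have hback := back_walk_eq wr
  have hB : (wr.reverse.foldl findRankBackStep (1, [1])).2.reverse
      = (findRankDeltas wr).scanl (· + ·) (1 - (findRankDeltas wr).sum) := by
    rw [List.foldl_reverse, hback]
    simp
  by_cases hw : wr = []
  · subst hw
    simp
  · simp only [hw, ne_eq, not_false_eq_true, if_pos]
    have hc := counters_eq wr 0 0
    have hwalk := walk_eq_scanl wr [] (1 - (findRankDeltas wr).sum)
    simp only [List.nil_append] at hwalk
    refine Prod.ext ?_ rfl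
    show wr.foldl findRankStep [1 + (_ + _)] = _
    rw [show (1 : Int) + (wr.foldl (fun s t => if t.2 = "wr1" then s + 1 else s) 0
          + wr.foldl (fun s t => if t.2 = "wr2" then s + (-1) else s) 0)
          = 1 - (findRankDeltas wr).sum by omega]
    rw [hwalk, hB]
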